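-- pv_equiv track=rewrite | github.com/ZIDANIDROS/UniversityTask | sems3/statistika probalitas/Statistika-2-main/Statistika_2.py | find_class_limits
-- ===== SOURCE A (Python) =====
-- def find_min(numbers):
--     return min(numbers)
--
-- def find_class_limits(numbers, number_of_classes, class_length):
--     bot_limit = [0] * number_of_classes
--     top_limit = [0] * number_of_classes
--     min_value = find_min(numbers)
--
--     for i in range(number_of_classes):
--         if i == 0:
--             bot_limit[i] = min_value
--             top_limit[i] = min_value + (class_length - 1)
--         else:
--             bot_limit[i] = top_limit[i - 1] + 1
--             top_limit[i] = bot_limit[i] + (class_length - 1)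
--
--     return bot_limit, top_limit
-- ===== SOURCE B (Python) =====
-- def find_class_limits(numbers, number_of_classes, class_length):
--     min_value = min(numbers)
--     bot_limit = [min_value + i * class_length for i in range(number_of_classes)]
--     top_limit = [b + class_length - 1 for b in bot_limit]
--     return bot_limit, top_limit
-- ===== Notes on version B (the rewrite author's own statement) =====
-- stated objective: simpler
-- what changed: Replaces the preallocated zero arrays and the branch-on-first-iteration recurrence reading top_limit[i-1] back with two direct comprehensions from the closed form min+i*class_length (exact on ints).
import Mathlib
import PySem

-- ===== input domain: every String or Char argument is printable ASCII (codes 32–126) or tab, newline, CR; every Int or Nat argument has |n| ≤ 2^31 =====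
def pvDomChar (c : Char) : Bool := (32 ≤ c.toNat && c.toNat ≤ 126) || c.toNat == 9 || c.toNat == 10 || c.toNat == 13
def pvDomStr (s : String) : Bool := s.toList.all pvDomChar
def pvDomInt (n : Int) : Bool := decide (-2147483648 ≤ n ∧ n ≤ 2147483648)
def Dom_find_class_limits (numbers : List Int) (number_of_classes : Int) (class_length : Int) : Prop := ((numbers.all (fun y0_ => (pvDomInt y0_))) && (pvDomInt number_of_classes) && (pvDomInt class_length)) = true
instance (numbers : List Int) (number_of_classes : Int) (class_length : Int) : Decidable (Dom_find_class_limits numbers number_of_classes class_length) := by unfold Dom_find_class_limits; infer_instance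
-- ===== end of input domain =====

-- B replaces A's preallocated zero arrays and branch-on-first-iteration recurrence by two direct
-- comprehensions from the closed form min + i*class_length (exact on ints); objective: simpler.


-- ===== PORT A =====
-- min(numbers): none exactly where Python raises ValueError (empty list)
def find_min (numbers : List Int) : Option Int := PySem.List.min? numbers (fun x => x)

-- the loop body; list writes bot[i]/top[i] are List.set, the read top_limit[i-1] is pyGetD
-- (the index is always in range under Pre_, so the default 0 is never the result)
def find_class_limits (numbers : List Int) (number_of_classes : Int) (class_length : Int) : List Int × List Int :=
  let bot_limit := PySem.List.pyRepeat [(0 : Int)] number_of_classes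
  let top_limit := PySem.List.pyRepeat [(0 : Int)] number_of_classes
  match find_min numbers with
  | none => (bot_limit, top_limit)   -- unreachable inside Pre_: Python raises ValueError here
  | some min_value =>
    (PySem.List.pyRange 0 number_of_classes 1).foldl
      (fun (st : List Int × List Int) i =>
        if i == 0 then
          (st.1.set 0 min_value, st.2.set 0 (min_value + (class_length - 1)))
        else
          let b := st.1.set i.toNat (PySem.List.pyGetD st.2 (i - 1) 0 + 1)
          (b, st.2.set i.toNat (PySem.List.pyGetD b i 0 + (class_length - 1))))
      (bot_limit, top_limit)

-- ===== PORT B =====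
def find_class_limits_alt (numbers : List Int) (number_of_classes : Int) (class_length : Int) : List Int × List Int :=
  match PySem.List.min? numbers (fun x => x) with
  | none => ([], [])   -- unreachable inside Pre_: min raises ValueError here
  | some min_value =>
    let bot_limit := (PySem.List.pyRange 0 number_of_classes 1).map (fun i => min_value + i * class_length)
    let top_limit := bot_limit.map (fun b => b + class_length - 1)
    (bot_limit, top_limit)

-- ===== PRECONDITION & SPEC =====
-- A (and B) raise ValueError from min() on an empty list; nothing else raises.
def Pre_find_class_limits (numbers : List Int) (number_of_classes : Int) (class_length : Int) : Prop := numbers ≠ []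
instance (numbers : List Int) (number_of_classes : Int) (class_length : Int) : Decidable (Pre_find_class_limits numbers number_of_classes class_length) := by unfold Pre_find_class_limits; infer_instance
def pvWitness_find_class_limits : List Int × Int × Int := ([3, 7, 1], 4, 5)

def Spec_find_class_limits (numbers : List Int) (number_of_classes : Int) (class_length : Int) (out : List Int × List Int) : Prop := out = find_class_limits_alt numbers number_of_classes class_length
instance (numbers : List Int) (number_of_classes : Int) (class_length : Int) (out : List Int × List Int) : Decidable (Spec_find_class_limits numbers number_of_classes class_length out) := by unfold Spec_find_class_limits; infer_instance

-- ===== CLAIM (what is proved, stated in full; the proofs are below) =====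
def Claim_equal_find_class_limits : Prop := ∀ (numbers : List Int) (number_of_classes : Int) (class_length : Int), Dom_find_class_limits numbers number_of_classes class_length → Pre_find_class_limits numbers number_of_classes class_length → Spec_find_class_limits numbers number_of_classes class_length (find_class_limits numbers number_of_classes class_length)

-- ===== LEMMAS AND PROOFS =====

-- the loop state after processing i = 0,…,k-1, as index-indexed lists over range N
def pvState (N k : Nat) (m L : Int) : List Int × List Int :=
  ((List.range N).map (fun j => if j < k then m + j * L else 0),
   (List.range N).map (fun j => if j < k then m + j * L + (L - 1) else 0))

theorem pv_set_map_range (N k : Nat) (f : Nat → Int) (v : Int) :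
    ((List.range N).map f).set k v = (List.range N).map (fun j => if j = k then v else f j) := by
  apply List.ext_getElem
  · simp
  · intro i h1 h2
    simp only [List.getElem_set, List.getElem_map, List.getElem_range]
    simp only [List.length_map, List.length_range] at h1
    by_cases h : k = i <;> simp [h, eq_comm]

theorem pv_getD_map_range (N k : Nat) (f : Nat → Int) (d : Int) (hk : k < N) :
    PySem.List.pyGetD ((List.range N).map f) (k : Int) d = f k := by
  rw [PySem.List.pyGetD_eq_getElem]
  · simp [hk]
  · exact Int.natCast_nonneg k
  · simpa [PySem.List.len] using (by exact_mod_cast hk : (k : Int) < (N : Int))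

theorem pv_loop_inv (N : Nat) (m L : Int) (k : Nat) (hk : k ≤ N) :
    (PySem.List.pyRange 0 (k : Int) 1).foldl
      (fun (st : List Int × List Int) i =>
        if i == 0 then
          (st.1.set 0 m, st.2.set 0 (m + (L - 1)))
        else
          (st.1.set i.toNat (PySem.List.pyGetD st.2 (i - 1) 0 + 1),
           st.2.set i.toNat
             (PySem.List.pyGetD (st.1.set i.toNat (PySem.List.pyGetD st.2 (i - 1) 0 + 1)) i 0 + (L - 1))))
      (pvState N 0 m L) = pvState N k m L := by
  induction k with
  | zero => simp [PySem.List.pyRange_zero_nat]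
  | succ k ih =>
    have hk' : k ≤ N := Nat.le_of_succ_le hk
    have hkN : k < N := hk
    have hcast : ((k + 1 : Nat) : Int) = ((k : Int) + 1) := by push_cast; ring
    rw [hcast, PySem.List.pyRange_one_succ_right (by exact_mod_cast Nat.zero_le k),
        List.foldl_append, ih hk']
    simp only [List.foldl_cons, List.foldl_nil]
    by_cases h0 : k = 0
    · subst h0
      simp only [pvState]
      rw [pv_set_map_range, pv_set_map_range]
      simp only [Int.cast_ofNat_Int, beq_self_eq_true, if_true, ite_true, reduceIte, Prod.mk.injEq]
      constructor <;>
      · apply List.map_congr_left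
        intro j hj
        by_cases hj0 : j = 0 <;> simp [hj0]
    · have hkpos : 0 < k := Nat.pos_of_ne_zero h0
      have hne : ((k : Int) == 0) = false := by
        simp [Int.natCast_eq_zero]; omega
      simp only [hne, Bool.false_eq_true, if_false, pvState]
      have hsub : ((k : Int) - 1) = ((k - 1 : Nat) : Int) := by
        push_cast [Nat.cast_sub hkpos]; ring
      rw [hsub, pv_getD_map_range N (k - 1) _ 0 (by omega)]
      have hlt : k - 1 < k := by omega
      rw [if_pos hlt]
      have htoNat : ((k : Int)).toNat = k := Int.toNat_natCast k
      rw [htoNat, pv_set_map_range, pv_getD_map_range N k _ 0 hkN, if_pos rfl,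
          pv_set_map_range]
      simp only [Prod.mk.injEq]
      constructor <;>
      · apply List.map_congr_left
        intro j hj
        have hcast2 : ((k - 1 : Nat) : Int) = (k : Int) - 1 := by
          push_cast [Nat.cast_sub hkpos]; ring
        by_cases hjk : j = k
        · subst hjk
          simp only [if_pos rfl, if_true, ite_true, if_pos (Nat.lt_succ_self j), hcast2]
          ring
        · rcases Nat.lt_or_ge j k with h | h
          · simp only [hjk, if_false, if_pos h, if_pos (Nat.lt_succ_of_lt h)]
          · have h1 : ¬ j < k := by omega
            have h2 : ¬ j < k + 1 := by omega
            simp [hjk, h1, h2]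

theorem find_class_limits_spec : Claim_equal_find_class_limits := by
  intro numbers N L _ hpre
  unfold Spec_find_class_limits find_class_limits find_class_limits_alt find_min
  cases hmin : PySem.List.min? numbers (fun x => x) with
  | none => exact absurd ((PySem.List.min?_eq_none_iff _ _).mp hmin) hpre
  | some m =>
    simp only []
    rcases Int.lt_or_le 0 N with hN | hN
    swap
    · rw [PySem.List.pyRange_one_eq_nil hN]
      simp [PySem.List.pyRepeat_singleton, Int.toNat_of_nonpos hN]
    · have hinit : (PySem.List.pyRepeat [(0 : Int)] N, PySem.List.pyRepeat [(0 : Int)] N)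
          = pvState N.toNat 0 m L := by
        simp [PySem.List.pyRepeat_singleton, pvState, List.map_const',
              List.eq_replicate_iff]
      rw [hinit]
      conv_lhs => rw [show N = ((N.toNat : Nat) : Int) from (Int.toNat_of_nonneg (le_of_lt hN)).symm]
      simp only [Int.toNat_natCast]
      rw [pv_loop_inv N.toNat m L N.toNat (le_refl _)]
      simp only [pvState, PySem.List.pyRange_one, Int.sub_zero, List.map_map, Prod.mk.injEq]
      constructor <;>
      · apply List.map_congr_left
        intro j hj
        simp only [Function.comp, List.mem_range] at *
        simp [hj]
        try ring
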